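-- pv_equiv track=rewrite | github.com/altayaman/Custom-tool---converter-of-csv-to-datatable | v2/csv_to_html.py | get_ranges_for_df
-- ===== SOURCE A (Python) =====
-- def get_ranges_for_df(input_df_size_, insertion_chunk_size_):
--     ranges_ = []
--
--     c = 0
--     while(True):
--         if(input_df_size_ >= insertion_chunk_size_):
--             input_df_size_ = input_df_size_ - insertion_chunk_size_
--             range_ = (c * insertion_chunk_size_ , (c+1) * insertion_chunk_size_ - 1)
--             ranges_.extend([range_])
--             c = c + 1
--             if(input_df_size_ == 0):
--                 break
--         else:
--             if(input_df_size_-1 < c*insertion_chunk_size_):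
--                 range_ = (c * insertion_chunk_size_, (c*insertion_chunk_size_) + input_df_size_ - 1)
--             else:
--                 range_ = (c * insertion_chunk_size_, input_df_size_ - 1)
--             ranges_.extend([range_])
--             break
--
--     return ranges_
-- ===== SOURCE B (Python) =====
-- def get_ranges_for_df(input_df_size_, insertion_chunk_size_):
--     n = max(1, -(-input_df_size_ // insertion_chunk_size_))  # ceil, at least one range
--     return [(i * insertion_chunk_size_,
--              min((i + 1) * insertion_chunk_size_, input_df_size_) - 1)
--             for i in range(n)]
-- ===== Notes on version B (the rewrite author's own statement) =====
-- stated objective: alternative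
-- what changed: Replaces A's stateful while-loop (destructive remaining-size subtraction, chunk counter, full-vs-partial branch pair, break) by a closed-form ceiling-division chunk count and a single comprehension producing each range arithmetically from its index.
-- outside the precondition, e.g. on get_ranges_for_df(0, 0): A returns [(0, -1)], B raises ZeroDivisionError; on get_ranges_for_df(-5, -2): A returns [(0, -6)], B returns [(0, -6), (-2, -6), (-4, -7)]
import Mathlib
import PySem

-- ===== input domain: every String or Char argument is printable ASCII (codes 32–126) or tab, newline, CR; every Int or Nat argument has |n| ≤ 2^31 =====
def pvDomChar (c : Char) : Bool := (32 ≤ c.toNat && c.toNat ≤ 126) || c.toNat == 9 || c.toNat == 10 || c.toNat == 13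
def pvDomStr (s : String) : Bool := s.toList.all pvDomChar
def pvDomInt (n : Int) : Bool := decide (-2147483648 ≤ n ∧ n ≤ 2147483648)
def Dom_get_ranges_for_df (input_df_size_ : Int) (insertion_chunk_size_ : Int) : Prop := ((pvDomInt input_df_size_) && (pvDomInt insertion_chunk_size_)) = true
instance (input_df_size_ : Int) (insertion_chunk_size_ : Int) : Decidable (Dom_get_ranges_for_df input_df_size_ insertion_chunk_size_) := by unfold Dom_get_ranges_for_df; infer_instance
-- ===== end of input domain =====

-- B replaces A's stateful while-loop (remaining-size subtraction, counter, full/partial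
-- branch pair) by a closed-form ceiling-division chunk count and one comprehension
-- (objective: alternative decomposition, same cost).

-- ===== PORT A =====
-- literal port of A's while-True loop; fuel only makes the recursion total
-- (inside Pre_ the fuel is never exhausted)
def grdLoopA (size chunk c : Int) (acc : List (Int × Int)) (fuel : Nat) : List (Int × Int) :=
  match fuel with
  | 0 => acc
  | fuel + 1 =>
    if size ≥ chunk then
      let size' := size - chunk
      let acc' := acc ++ [(c * chunk, (c + 1) * chunk - 1)]
      if size' = 0 then acc' else grdLoopA size' chunk (c + 1) acc' fuel
    else
      if size - 1 < c * chunk then acc ++ [(c * chunk, c * chunk + size - 1)]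
      else acc ++ [(c * chunk, size - 1)]

def get_ranges_for_df (input_df_size_ : Int) (insertion_chunk_size_ : Int) : List (Int × Int) :=
  grdLoopA input_df_size_ insertion_chunk_size_ 0 [] (input_df_size_.toNat + 1)

-- ===== PORT B =====
-- n = max(1, -(-size // chunk)): ceiling division, at least one range;
-- then each range is computed arithmetically from its index i.
def get_ranges_for_df_alt (input_df_size_ : Int) (insertion_chunk_size_ : Int) : List (Int × Int) :=
  let n := max 1 (-(PySem.Int.floordiv (-input_df_size_) insertion_chunk_size_))
  (PySem.List.pyRange 0 n 1).map
    (fun i => (i * insertion_chunk_size_, min ((i + 1) * insertion_chunk_size_) input_df_size_ - 1))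

-- ===== PRECONDITION & SPEC =====
-- Pre_ excludes non-positive chunk sizes: there A never terminates whenever size > chunk,
-- and on the remaining meaningless corner (size ≤ chunk ≤ 0) A's single degenerate negative
-- range and B's ceiling-division ranges are both arbitrary (B raises ZeroDivisionError at chunk = 0).
def Pre_get_ranges_for_df (input_df_size_ : Int) (insertion_chunk_size_ : Int) : Prop :=
  0 < insertion_chunk_size_
instance (input_df_size_ : Int) (insertion_chunk_size_ : Int) : Decidable (Pre_get_ranges_for_df input_df_size_ insertion_chunk_size_) := by unfold Pre_get_ranges_for_df; infer_instance

def pvWitness_get_ranges_for_df : Int × Int := (10, 3)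

def Spec_get_ranges_for_df (input_df_size_ : Int) (insertion_chunk_size_ : Int) (out : List (Int × Int)) : Prop := out = get_ranges_for_df_alt input_df_size_ insertion_chunk_size_
instance (input_df_size_ : Int) (insertion_chunk_size_ : Int) (out : List (Int × Int)) : Decidable (Spec_get_ranges_for_df input_df_size_ insertion_chunk_size_ out) := by unfold Spec_get_ranges_for_df; infer_instance

-- ===== CLAIM (what is proved, stated in full; the proofs are below) =====
def Claim_equal_get_ranges_for_df : Prop := ∀ (input_df_size_ : Int) (insertion_chunk_size_ : Int), Dom_get_ranges_for_df input_df_size_ insertion_chunk_size_ → Pre_get_ranges_for_df input_df_size_ insertion_chunk_size_ → Spec_get_ranges_for_df input_df_size_ insertion_chunk_size_ (get_ranges_for_df input_df_size_ insertion_chunk_size_)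

-- ===== LEMMAS AND PROOFS =====

-- Loop characterisation: from state (remaining = S - c*chunk, counter c), A's loop appends
-- exactly B's ranges for indices c, c+1, …, n-1 (n = B's ceiling chunk count).
theorem grdLoopA_eq_map (fuel : Nat) : ∀ (S k c : Int) (acc : List (Int × Int)),
    0 < k → 0 ≤ c → (c * k < S ∨ c = 0) → (S - c * k).toNat < fuel →
    grdLoopA (S - c * k) k c acc fuel
      = acc ++ (PySem.List.pyRange c (max 1 (-(PySem.Int.floordiv (-S) k))) 1).map
          (fun i => (i * k, min ((i + 1) * k) S - 1)) := by
  induction fuel with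
  | zero => intro S k c acc _ _ _ hf; omega
  | succ f ih =>
    intro S k c acc hk hc hinv hf
    have hm := (PySem.Int.neg_floordiv_neg_eq_iff_of_pos (a := S) (b := k) hk).mp rfl
    set m := -(PySem.Int.floordiv (-S) k) with hmdef
    have hn1 : (1 : Int) ≤ max 1 m := le_max_left _ _
    simp only [grdLoopA]
    by_cases h1 : S - c * k ≥ k
    · -- full-chunk branch
      have hcn : c < max 1 m := by
        have : c * k < m * k := by nlinarith
        have := lt_of_mul_lt_mul_right this (le_of_lt hk)
        omega
      rw [PySem.List.pyRange_one_cons hcn]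
      have hmin : min ((c + 1) * k) S = (c + 1) * k := min_eq_left (by nlinarith)
      simp only [ge_iff_le, h1, if_pos, List.map_cons, hmin]
      by_cases h2 : S - c * k - k = 0
      · -- exact fit: loop breaks; range list must end here too
        have hle : max 1 m ≤ c + 1 := by
          have : (m - 1) * k < (c + 1) * k := by nlinarith
          have := lt_of_mul_lt_mul_right this (le_of_lt hk)
          omega
        rw [if_pos h2, PySem.List.pyRange_one_eq_nil hle]
        simp
      · -- continue with counter c+1
        rw [if_neg h2]
        have hgt : k < S - c * k := by
          rcases lt_or_eq_of_le h1 with h | h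
          · exact h
          · exact absurd (by omega : S - c * k - k = 0) h2
        have hstep : S - c * k - k = S - (c + 1) * k := by ring
        have hrec := ih S k (c + 1) (acc ++ [(c * k, (c + 1) * k - 1)]) hk (by omega)
          (Or.inl (by nlinarith)) (by omega)
        rw [hstep, hrec, ← hmdef]
        have : (c + 1) * k - 1 = min ((c + 1) * k) S - 1 := by rw [hmin]
        rw [this]
        simp [List.append_assoc]
    · -- final partial chunk: in both of A's sub-branches the appended pair is (c*k, S-1)
      have hlt : S - c * k < k := by omega
      have hle : max 1 m ≤ c + 1 := by
        have : (m - 1) * k < (c + 1) * k := by nlinarith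
        have := lt_of_mul_lt_mul_right this (le_of_lt hk)
        omega
      have hcn : c < max 1 m := by
        rcases hinv with h | h
        · have : c * k < m * k := by nlinarith
          have := lt_of_mul_lt_mul_right this (le_of_lt hk)
          omega
        · omega
      rw [PySem.List.pyRange_one_cons hcn, PySem.List.pyRange_one_eq_nil hle]
      have hmin : min ((c + 1) * k) S = S := min_eq_right (by nlinarith)
      rw [if_neg h1]
      by_cases h2 : S - c * k - 1 < c * k
      · rw [if_pos h2]
        simp only [List.map_cons, List.map_nil, hmin]
        have : c * k + (S - c * k) - 1 = S - 1 := by ring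
        rw [this]
      · -- reachable only with c = 0 (else c*k ≥ k > remaining-1)
        have hc0 : c = 0 := by
          by_contra hne
          have hc1 : (1 : Int) ≤ c := by omega
          have : k ≤ c * k := by nlinarith
          omega
        have hSk : S ≤ k := by nlinarith
        rw [if_neg h2]
        simp only [List.map_cons, List.map_nil, hc0]
        simp [min_eq_right hSk]

-- ===== VERDICT (by name: the statement is the Claim_ definition above) =====
theorem get_ranges_for_df_spec : Claim_equal_get_ranges_for_df := by
  intro S k _ hk
  unfold Spec_get_ranges_for_df get_ranges_for_df get_ranges_for_df_alt
  have h := grdLoopA_eq_map (S.toNat + 1) S k 0 [] hk le_rfl (Or.inr rfl) (by omega)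
  simpa using h
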